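-- pv_equiv track=rewrite | github.com/Kamend1/SoftUni-Courses | softuni_python_advanced/week_4_multidimensional_lists/exercise_2/range_day.py | shooter_move
-- ===== SOURCE A (Python) =====
-- def shooter_move(row_idx, col_idx, matrix, command, steps):
--     matrix[row_idx][col_idx] = '.'
--     for _ in range(steps):
--         row_idx += directions[command][0]
--         col_idx += directions[command][1]
--
--     if 0 <= row_idx < 5 and 0 <= col_idx < 5 and matrix[row_idx][col_idx] != 'x':
--         matrix[row_idx][col_idx] = 'A'
--     else:
--         for _ in range(steps):
--             row_idx -= directions[command][0]
--             col_idx -= directions[command][1]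
--         matrix[row_idx][col_idx] = 'A'
--
--     return row_idx, col_idx
--
-- directions = {
--     'left': [0, -1],
--     'right': [0, +1],
--     'up': [-1, 0],
--     'down': [+1, 0],
-- }
-- ===== SOURCE B (Python) =====
-- DELTAS = {
--     'left': (0, -1),
--     'right': (0, +1),
--     'up': (-1, 0),
--     'down': (+1, 0),
-- }
--
--
-- def shooter_move(row_idx, col_idx, matrix, command, steps):
--     matrix[row_idx][col_idx] = '.'
--     dr, dc = DELTAS.get(command, (0, 0))
--     n = max(steps, 0)
--     nr, nc = row_idx + dr * n, col_idx + dc * n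
--     if 0 <= nr < 5 and 0 <= nc < 5 and matrix[nr][nc] != 'x':
--         matrix[nr][nc] = 'A'
--         return nr, nc
--     matrix[row_idx][col_idx] = 'A'
--     return row_idx, col_idx
-- ===== Notes on version B (the rewrite author's own statement) =====
-- stated objective: simpler
-- what changed: Replaces both step-by-step movement loops (forward walk and explicit revert) by one closed-form destination computation nr = row + dr*max(steps,0), nc = col + dc*max(steps,0) from a defaulted dictionary lookup, returning the original cell directly when the destination is blocked or off-grid.
import Mathlib
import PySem

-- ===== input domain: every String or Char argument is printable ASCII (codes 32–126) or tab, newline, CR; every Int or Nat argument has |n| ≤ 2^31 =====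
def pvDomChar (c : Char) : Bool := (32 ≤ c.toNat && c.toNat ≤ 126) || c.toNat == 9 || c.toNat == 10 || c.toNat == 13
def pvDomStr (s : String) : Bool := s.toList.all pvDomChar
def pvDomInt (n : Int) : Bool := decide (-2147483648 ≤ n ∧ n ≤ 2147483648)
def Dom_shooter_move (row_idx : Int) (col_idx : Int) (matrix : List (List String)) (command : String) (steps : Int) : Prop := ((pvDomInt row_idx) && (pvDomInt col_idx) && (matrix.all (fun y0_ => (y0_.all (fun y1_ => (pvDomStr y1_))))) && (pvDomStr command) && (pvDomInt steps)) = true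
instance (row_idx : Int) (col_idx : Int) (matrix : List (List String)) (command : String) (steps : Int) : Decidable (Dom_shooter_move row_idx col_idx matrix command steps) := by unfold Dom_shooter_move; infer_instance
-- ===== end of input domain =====

-- B replaces A's two step-by-step movement loops (forward walk + explicit revert) by one
-- closed-form destination computation with a defaulted dictionary lookup ('simpler').
-- Both A and B mutate the matrix in place identically; the equivalence proved here is
-- about the RETURN value only.

-- ===== PORT A =====
-- Python list assignment with possibly negative (wrapping) index; exact on Pre_
-- (which guarantees the indices the Python actually uses are in range)
def pySetCell (m : List (List String)) (r c : Int) (v : String) : List (List String) :=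
  let i : Nat := (if r < 0 then r + m.length else r).toNat
  match m[i]? with
  | none => m
  | some row =>
    let j : Nat := (if c < 0 then c + row.length else c).toNat
    m.set i (row.set j v)

-- directions[command]; Pre_ guarantees the key is present whenever it is looked up
def dirOf (command : String) : Int × Int :=
  if command = "left" then (0, -1)
  else if command = "right" then (0, 1)
  else if command = "up" then (-1, 0)
  else if command = "down" then (1, 0)
  else (0, 0)

-- the chained condition 0 <= r < 5 and 0 <= c < 5 and matrix[r][c] != 'x'
def canLand (m : List (List String)) (r c : Int) : Bool :=
  decide (0 ≤ r) && decide (r < 5) && decide (0 ≤ c) && decide (c < 5) &&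
    ((PySem.List.pyGet? ((PySem.List.pyGet? m r).getD []) c).getD "" != "x")

def shooter_move (row_idx : Int) (col_idx : Int) (matrix : List (List String)) (command : String) (steps : Int) : Int × Int :=
  let m1 := pySetCell matrix row_idx col_idx "."
  let d := dirOf command
  -- for _ in range(steps): row_idx += d[0]; col_idx += d[1]
  let p1 := (List.range steps.toNat).foldl (fun (p : Int × Int) _ => (p.1 + d.1, p.2 + d.2)) (row_idx, col_idx)
  if canLand m1 p1.1 p1.2 then
    p1
  else
    -- for _ in range(steps): row_idx -= d[0]; col_idx -= d[1]
    (List.range steps.toNat).foldl (fun (p : Int × Int) _ => (p.1 - d.1, p.2 - d.2)) p1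

-- ===== PORT B =====
-- DELTAS = {'left': (0,-1), 'right': (0,1), 'up': (-1,0), 'down': (1,0)}
def bDeltas : PySem.Dict String (Int × Int) :=
  PySem.Dict.ofList [("left", ((0 : Int), (-1 : Int))), ("right", (0, 1)), ("up", (-1, 0)), ("down", (1, 0))]

def shooter_move_alt (row_idx : Int) (col_idx : Int) (matrix : List (List String)) (command : String) (steps : Int) : Int × Int :=
  -- matrix[row_idx][col_idx] = '.'   (negative indices wrap, as in Python)
  let grid := matrix.modify (if row_idx < 0 then row_idx + matrix.length else row_idx).toNat
    (fun row => row.modify (if col_idx < 0 then col_idx + row.length else col_idx).toNat (fun _ => "."))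
  -- dr, dc = DELTAS.get(command, (0, 0)); n = max(steps, 0)
  let d := bDeltas.getD command (0, 0)
  let n : Int := max steps 0
  let nr := row_idx + d.1 * n
  let nc := col_idx + d.2 * n
  if 0 ≤ nr ∧ nr < 5 ∧ 0 ≤ nc ∧ nc < 5 ∧ (grid.getD nr.toNat []).getD nc.toNat "" ≠ "x" then
    (nr, nc)
  else
    (row_idx, col_idx)

-- ===== PRECONDITION & SPEC =====
-- Pre_ = exactly the inputs on which Python A returns normally: the initial write's indices
-- are valid (negative ones wrap), the command is a known direction whenever steps > 0 (else
-- KeyError), and the destination cell read by the chained condition exists (else IndexError).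
def rowLenAt (matrix : List (List String)) (r : Int) : Int :=
  ((matrix.getD (if r < 0 then r + matrix.length else r).toNat []).length : Int)

-- closed-form destination row/column of the move
def destOf (row_idx : Int) (col_idx : Int) (command : String) (steps : Int) : Int × Int :=
  if 0 < steps then (row_idx + (dirOf command).1 * steps, col_idx + (dirOf command).2 * steps)
  else (row_idx, col_idx)

def Pre_shooter_move (row_idx : Int) (col_idx : Int) (matrix : List (List String)) (command : String) (steps : Int) : Prop :=
  (-(matrix.length : Int) ≤ row_idx ∧ row_idx < (matrix.length : Int)) ∧
  (-(rowLenAt matrix row_idx) ≤ col_idx ∧ col_idx < rowLenAt matrix row_idx) ∧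
  (0 < steps → (command = "left" ∨ command = "right" ∨ command = "up" ∨ command = "down")) ∧
  ((0 ≤ (destOf row_idx col_idx command steps).1 ∧ (destOf row_idx col_idx command steps).1 < 5 ∧
    0 ≤ (destOf row_idx col_idx command steps).2 ∧ (destOf row_idx col_idx command steps).2 < 5) →
   ((destOf row_idx col_idx command steps).1 < (matrix.length : Int) ∧
    (destOf row_idx col_idx command steps).2 < rowLenAt matrix (destOf row_idx col_idx command steps).1))
instance (row_idx : Int) (col_idx : Int) (matrix : List (List String)) (command : String) (steps : Int) : Decidable (Pre_shooter_move row_idx col_idx matrix command steps) := by unfold Pre_shooter_move; infer_instance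

def pvWitness_shooter_move : Int × Int × List (List String) × String × Int :=
  (0, 0, [["A", ".", "x"], [".", ".", "."]], "right", 1)

def Spec_shooter_move (row_idx : Int) (col_idx : Int) (matrix : List (List String)) (command : String) (steps : Int) (out : Int × Int) : Prop := out = shooter_move_alt row_idx col_idx matrix command steps
instance (row_idx : Int) (col_idx : Int) (matrix : List (List String)) (command : String) (steps : Int) (out : Int × Int) : Decidable (Spec_shooter_move row_idx col_idx matrix command steps out) := by unfold Spec_shooter_move; infer_instance

-- ===== CLAIM (what is proved, stated in full; the proofs are below) =====
def Claim_equal_shooter_move : Prop := ∀ (row_idx : Int) (col_idx : Int) (matrix : List (List String)) (command : String) (steps : Int), Dom_shooter_move row_idx col_idx matrix command steps → Pre_shooter_move row_idx col_idx matrix command steps → Spec_shooter_move row_idx col_idx matrix command steps (shooter_move row_idx col_idx matrix command steps)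

-- ===== LEMMAS AND PROOFS =====

theorem foldl_add_range (d : Int × Int) (n : Nat) (r c : Int) :
    (List.range n).foldl (fun (p : Int × Int) _ => (p.1 + d.1, p.2 + d.2)) (r, c)
      = (r + d.1 * n, c + d.2 * n) := by
  induction n with
  | zero => simp
  | succ k ih =>
    rw [List.range_succ, List.foldl_append, ih]
    simp
    constructor <;> ring

theorem foldl_sub_range (d : Int × Int) (n : Nat) (r c : Int) :
    (List.range n).foldl (fun (p : Int × Int) _ => (p.1 - d.1, p.2 - d.2)) (r, c)
      = (r - d.1 * n, c - d.2 * n) := by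
  induction n with
  | zero => simp
  | succ k ih =>
    rw [List.range_succ, List.foldl_append, ih]
    simp
    constructor <;> ring

-- B's nested List.modify equals A's get-then-set cell update
theorem modify_eq_pySetCell (m : List (List String)) (r c : Int) (v : String) :
    m.modify (if r < 0 then r + m.length else r).toNat
      (fun row => row.modify (if c < 0 then c + row.length else c).toNat (fun _ => v))
      = pySetCell m r c v := by
  unfold pySetCell
  rw [List.modify_eq_set_getElem?]
  cases h : m[(if r < 0 then r + (m.length : Int) else r).toNat]? with
  | none => simp [h]
  | some row =>
    simp only [h, Option.map_eq_map, Option.map_some, Option.getD_some]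
    congr 1
    rw [List.modify_eq_set_getElem?]
    cases hj : row[(if c < 0 then c + (row.length : Int) else c).toNat]? with
    | none =>
      rw [List.getElem?_eq_none_iff] at hj
      exact (List.set_eq_of_length_le hj).symm
    | some x => simp

-- Python's defaulted read at a nonnegative index equals List.getD
theorem pyGetD_nonneg {α : Type} (l : List α) (i : Int) (d : α) (hi : 0 ≤ i) :
    (PySem.List.pyGet? l i).getD d = l.getD i.toNat d := by
  rw [List.getD_eq_getElem?_getD]
  by_cases h : i < (l.length : Int)
  · simp [PySem.List.pyGet?, PySem.List.pyIdx?, hi, h]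
  · have hl : l.length ≤ i.toNat := by omega
    simp [PySem.List.pyGet?, PySem.List.pyIdx?, hi, h]

-- A's chained landing test, characterised as B writes it
theorem canLand_iff (g : List (List String)) (nr nc : Int) :
    canLand g nr nc = true ↔
      (0 ≤ nr ∧ nr < 5 ∧ 0 ≤ nc ∧ nc < 5 ∧ (g.getD nr.toNat []).getD nc.toNat "" ≠ "x") := by
  unfold canLand
  simp only [Bool.and_eq_true, decide_eq_true_eq, bne_iff_ne, ne_eq]
  constructor
  · rintro ⟨⟨⟨⟨h1, h2⟩, h3⟩, h4⟩, h5⟩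
    refine ⟨h1, h2, h3, h4, ?_⟩
    rwa [pyGetD_nonneg _ nc "" h3, pyGetD_nonneg g nr [] h1] at h5
  · rintro ⟨h1, h2, h3, h4, h5⟩
    refine ⟨⟨⟨⟨h1, h2⟩, h3⟩, h4⟩, ?_⟩
    rwa [pyGetD_nonneg _ nc "" h3, pyGetD_nonneg g nr [] h1]

theorem bDeltas_known (command : String)
    (h : command = "left" ∨ command = "right" ∨ command = "up" ∨ command = "down") :
    bDeltas.getD command (0, 0) = dirOf command := by
  rcases h with h | h | h | h <;> subst h <;> decide

-- ===== VERDICT (by name: the statement is the Claim_ definition above) =====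
theorem shooter_move_spec : Claim_equal_shooter_move := by
  intro r c m cmd s _ hpre
  show shooter_move r c m cmd s = shooter_move_alt r c m cmd s
  unfold shooter_move shooter_move_alt
  rw [modify_eq_pySetCell]
  by_cases hs : 0 < s
  · have hn : ((s.toNat : Int)) = s := Int.toNat_of_nonneg (le_of_lt hs)
    have hmax : max s 0 = s := max_eq_left (le_of_lt hs)
    rw [bDeltas_known cmd (hpre.2.2.1 hs)]
    simp only [foldl_add_range, foldl_sub_range, hn, hmax, add_sub_cancel_right, canLand_iff]
  · have hn : s.toNat = 0 := Int.toNat_of_nonpos (le_of_not_gt hs)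
    have hmax : max s 0 = 0 := max_eq_right (le_of_not_gt hs)
    simp only [hn, hmax, mul_zero, add_zero, List.range_zero, List.foldl_nil]
    split <;> split <;> rfl
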